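-- pv_equiv track=rewrite | github.com/jso122-2/Thinkerbell-Final- | backend_api_server.py | _generate_additional_clauses
-- ===== SOURCE A (Python) =====
-- def _generate_additional_clauses(human_example: str, doc_type: str, target_words: int) -> str:
--     """Generate additional clauses to reach target length"""
--     additional_text = "ADDITIONAL TERMS AND CONDITIONS\n\n"
--
--     clauses = [
--         "Force Majeure: Neither party shall be liable for any failure or delay in performance due to circumstances beyond their reasonable control, including but not limited to acts of God, natural disasters, war, terrorism, labor disputes, or government regulations.",
--
--         "Confidentiality: Both parties acknowledge that they may have access to confidential and proprietary information. All such information shall be kept strictly confidential and not disclosed to third parties without prior written consent.",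
--
--         "Independent Contractor Relationship: The parties acknowledge that this Agreement creates an independent contractor relationship and not an employment, partnership, or joint venture relationship.",
--
--         "Modification and Amendment: This Agreement may only be modified or amended by written instrument signed by both parties. No oral modifications shall be binding or enforceable.",
--
--         "Severability: If any provision of this Agreement is deemed invalid or unenforceable, the remaining provisions shall continue in full force and effect.",
--
--         "Entire Agreement: This Agreement constitutes the entire agreement between the parties and supersedes all prior negotiations, representations, or agreements relating to the subject matter hereof.",
--
--         "Assignment: Neither party may assign this Agreement without the prior written consent of the other party, except that either party may assign this Agreement to an affiliate or in connection with a merger or sale of assets.",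
--
--         "Notices: All notices required under this Agreement shall be in writing and delivered by certified mail, email with delivery confirmation, or recognized courier service to the addresses specified herein."
--     ]
--
--     # Add clauses until we reach approximately the target word count
--     current_words = len(additional_text.split())
--     clause_index = 0
--
--     while current_words < target_words and clause_index < len(clauses):
--         additional_text += "\n\n" + clauses[clause_index]
--         current_words = len(additional_text.split())
--         clause_index += 1
--
--     return additional_text
-- ===== SOURCE B (Python) =====
-- def _generate_additional_clauses(human_example: str, doc_type: str, target_words: int) -> str:
--     """Generate additional clauses to reach target length (index-first restructuring)."""
--     header = "ADDITIONAL TERMS AND CONDITIONS\n\n"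
--
--     clauses = [
--         "Force Majeure: Neither party shall be liable for any failure or delay in performance due to circumstances beyond their reasonable control, including but not limited to acts of God, natural disasters, war, terrorism, labor disputes, or government regulations.",
--
--         "Confidentiality: Both parties acknowledge that they may have access to confidential and proprietary information. All such information shall be kept strictly confidential and not disclosed to third parties without prior written consent.",
--
--         "Independent Contractor Relationship: The parties acknowledge that this Agreement creates an independent contractor relationship and not an employment, partnership, or joint venture relationship.",
--
--         "Modification and Amendment: This Agreement may only be modified or amended by written instrument signed by both parties. No oral modifications shall be binding or enforceable.",
--
--         "Severability: If any provision of this Agreement is deemed invalid or unenforceable, the remaining provisions shall continue in full force and effect.",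
--
--         "Entire Agreement: This Agreement constitutes the entire agreement between the parties and supersedes all prior negotiations, representations, or agreements relating to the subject matter hereof.",
--
--         "Assignment: Neither party may assign this Agreement without the prior written consent of the other party, except that either party may assign this Agreement to an affiliate or in connection with a merger or sale of assets.",
--
--         "Notices: All notices required under this Agreement shall be in writing and delivered by certified mail, email with delivery confirmation, or recognized courier service to the addresses specified herein."
--     ]
--
--     # Cumulative word totals: prefix[i] = words in header plus the first i clauses.
--     # ('\n\n' separators contribute no words, so totals are plain sums of split() lengths.)
--     prefix = [len(header.split())]
--     for c in clauses:
--         prefix.append(prefix[-1] + len(c.split()))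
--
--     # k = smallest number of clauses whose cumulative total already reaches
--     # target_words (check-before-append rule), capped at len(clauses).
--     k = len(clauses)
--     for i, s in enumerate(prefix[:-1]):
--         if s >= target_words:
--             k = i
--             break
--
--     return header + ''.join('\n\n' + c for c in clauses[:k])
-- ===== Notes on version B (the rewrite author's own statement) =====
-- stated objective: alternative
-- what changed: Replaces the incremental build-string-then-resplit-the-whole-text loop by precomputed per-clause word counts with cumulative prefix sums, an index search for the smallest sufficient clause count k, and a single slice-and-join construction of the output.
import Mathlib
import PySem

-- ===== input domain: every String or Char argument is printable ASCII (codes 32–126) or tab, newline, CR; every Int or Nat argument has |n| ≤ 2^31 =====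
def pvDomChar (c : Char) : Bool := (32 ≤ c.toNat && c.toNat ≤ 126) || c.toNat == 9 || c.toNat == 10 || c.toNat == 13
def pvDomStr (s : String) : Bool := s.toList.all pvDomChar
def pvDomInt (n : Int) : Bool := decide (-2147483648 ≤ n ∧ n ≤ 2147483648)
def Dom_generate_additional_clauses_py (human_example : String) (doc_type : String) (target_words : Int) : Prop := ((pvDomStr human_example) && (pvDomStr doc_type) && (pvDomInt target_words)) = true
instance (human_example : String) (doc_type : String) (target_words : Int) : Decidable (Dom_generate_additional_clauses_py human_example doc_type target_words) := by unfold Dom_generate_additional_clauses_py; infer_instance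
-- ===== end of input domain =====

-- B replaces A's build-then-resplit-the-whole-text loop by per-clause word counts,
-- prefix sums, an index search for the clause count k, and one slice-and-join (objective: alternative).

-- Fixed data shared by both programs (both Python versions carry the identical literals).
def pvHeader : String := "ADDITIONAL TERMS AND CONDITIONS\n\n"
def pvClauses : List String :=
  ["Force Majeure: Neither party shall be liable for any failure or delay in performance due to circumstances beyond their reasonable control, including but not limited to acts of God, natural disasters, war, terrorism, labor disputes, or government regulations.",
   "Confidentiality: Both parties acknowledge that they may have access to confidential and proprietary information. All such information shall be kept strictly confidential and not disclosed to third parties without prior written consent.",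
   "Independent Contractor Relationship: The parties acknowledge that this Agreement creates an independent contractor relationship and not an employment, partnership, or joint venture relationship.",
   "Modification and Amendment: This Agreement may only be modified or amended by written instrument signed by both parties. No oral modifications shall be binding or enforceable.",
   "Severability: If any provision of this Agreement is deemed invalid or unenforceable, the remaining provisions shall continue in full force and effect.",
   "Entire Agreement: This Agreement constitutes the entire agreement between the parties and supersedes all prior negotiations, representations, or agreements relating to the subject matter hereof.",
   "Assignment: Neither party may assign this Agreement without the prior written consent of the other party, except that either party may assign this Agreement to an affiliate or in connection with a merger or sale of assets.",
   "Notices: All notices required under this Agreement shall be in writing and delivered by certified mail, email with delivery confirmation, or recognized courier service to the addresses specified herein."]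

-- ===== PORT A =====
-- while current_words < target_words and clause_index < len(clauses): append, recount.
-- The recursion walks the clause list; the condition recomputes len(text.split()) on the
-- current text, which is exactly the value A keeps in current_words at that check.
def pvLoopA (target_words : Int) : String → List String → String
  | text, [] => text
  | text, c :: rest =>
    if PySem.List.len (PySem.Str.split₀ text) < target_words then
      pvLoopA target_words (text ++ ("\n\n" ++ c)) rest
    else text

def generate_additional_clauses_py (human_example : String) (doc_type : String) (target_words : Int) : String :=
  pvLoopA target_words pvHeader pvClauses

-- ===== PORT B =====
-- for i, s in enumerate(prefix[:-1]): if s >= target_words: k = i; break   (else k = len(clauses))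
def pvFindK (target_words : Int) (dflt : Int) : List Int → Int → Int
  | [], _ => dflt
  | s :: rest, i => if s ≥ target_words then i else pvFindK target_words dflt rest (i + 1)

def generate_additional_clauses_py_alt (human_example : String) (doc_type : String) (target_words : Int) : String :=
  -- prefix = [len(header.split())]; for c in clauses: prefix.append(prefix[-1] + len(c.split()))
  let pfx := pvClauses.foldl
    (fun acc c => acc ++ [PySem.List.pyGetD acc (-1) 0 + PySem.List.len (PySem.Str.split₀ c)])
    [PySem.List.len (PySem.Str.split₀ pvHeader)]
  let k := pvFindK target_words (PySem.List.len pvClauses) (PySem.List.slice pfx none (some (-1))) 0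
  pvHeader ++ PySem.Str.join "" ((PySem.List.slice pvClauses none (some k)).map (fun c => "\n\n" ++ c))

-- ===== PRECONDITION & SPEC =====
def Spec_generate_additional_clauses_py (human_example : String) (doc_type : String) (target_words : Int) (out : String) : Prop := out = generate_additional_clauses_py_alt human_example doc_type target_words
instance (human_example : String) (doc_type : String) (target_words : Int) (out : String) : Decidable (Spec_generate_additional_clauses_py human_example doc_type target_words out) := by unfold Spec_generate_additional_clauses_py; infer_instance

-- ===== CLAIM (what is proved, stated in full; the proofs are below) =====
def Claim_equal_generate_additional_clauses_py : Prop := ∀ (human_example : String) (doc_type : String) (target_words : Int), Dom_generate_additional_clauses_py human_example doc_type target_words → Spec_generate_additional_clauses_py human_example doc_type target_words (generate_additional_clauses_py human_example doc_type target_words)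

-- ===== LEMMAS AND PROOFS =====

-- word count of a string, len(s.split())
def pvCount (s : String) : Int := PySem.List.len (PySem.Str.split₀ s)

-- running totals: pvScan p cs = [p, p + w c0, p + w c0 + w c1, …]  (B's `prefix` list)
def pvScan (p : Int) : List String → List Int
  | [] => [p]
  | c :: cs => p :: pvScan (p + pvCount c) cs

def pvPfx (p : Int) : List String → List Int
  | [] => []
  | c :: cs => p :: pvPfx (p + pvCount c) cs

-- the number of clauses both programs include, as a recursion over the clause list
def pvKNat (t : Int) (p : Int) : List String → Nat
  | [] => 0
  | c :: cs => if t ≤ p then 0 else pvKNat t (p + pvCount c) cs + 1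

theorem pv_go_acc (b : List Char) : ∀ (cur : List Char) (acc : List (List Char)),
    PySem.Chars.split₀.go b cur acc = acc.reverse ++ PySem.Chars.split₀.go b cur [] := by
  induction b with
  | nil =>
    intro cur acc
    simp only [PySem.Chars.split₀.go]
    split_ifs <;> simp
  | cons c b ih =>
    intro cur acc
    simp only [PySem.Chars.split₀.go]
    split_ifs with h1 h2
    · rw [ih [] acc]
    · rw [ih [] (cur.reverse :: acc), ih [] [cur.reverse]]
      simp
    · rw [ih (c :: cur) acc]

theorem pv_go_newline (a : List Char) : ∀ (b cur : List Char) (acc : List (List Char)),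
    PySem.Chars.split₀.go (a ++ '\n' :: b) cur acc
      = PySem.Chars.split₀.go b [] ((PySem.Chars.split₀.go a cur acc).reverse) := by
  induction a with
  | nil =>
    intro b cur acc
    simp only [List.nil_append, PySem.Chars.split₀.go]
    have hs : PySem.Chars.isspace '\n' = true := by decide
    rw [hs]
    split_ifs <;> simp_all
  | cons c a ih =>
    intro b cur acc
    simp only [List.cons_append, PySem.Chars.split₀.go]
    split_ifs with h1 h2
    · exact ih b [] acc
    · exact ih b [] (cur.reverse :: acc)
    · exact ih b (c :: cur) acc

theorem pv_split₀_sep (a b : List Char) :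
    PySem.Chars.split₀ (a ++ '\n' :: '\n' :: b) = PySem.Chars.split₀ a ++ PySem.Chars.split₀ b := by
  show PySem.Chars.split₀.go (a ++ '\n' :: '\n' :: b) [] [] = _
  rw [pv_go_newline a ('\n' :: b) [] []]
  have hs : PySem.Chars.isspace '\n' = true := by decide
  simp only [PySem.Chars.split₀.go, hs, if_true, List.isEmpty_nil]
  rw [pv_go_acc b [] ((PySem.Chars.split₀.go a [] []).reverse)]
  simp [PySem.Chars.split₀]

theorem pv_count_append (x c : String) : pvCount (x ++ ("\n\n" ++ c)) = pvCount x + pvCount c := by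
  simp only [pvCount, PySem.Str.split₀, PySem.List.len_eq, List.length_map]
  have h2 : (x ++ ("\n\n" ++ c)).toList = x.toList ++ '\n' :: '\n' :: c.toList := by
    rw [String.toList_append, String.toList_append]
    rfl
  rw [h2, pv_split₀_sep]
  simp

theorem pv_join_nil : PySem.Str.join "" [] = "" := rfl

theorem pv_join_cons (x : String) (l : List String) :
    PySem.Str.join "" (x :: l) = x ++ PySem.Str.join "" l := by
  cases l with
  | nil => simp [PySem.Str.join, PySem.Chars.join, List.intercalate]
  | cons y l =>
    simp only [PySem.Str.join, PySem.Chars.join, List.map_cons, List.intercalate]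
    rw [List.intersperse_cons₂]
    simp [String.ofList_append]

theorem pv_loopA_eq (cs : List String) : ∀ (t : Int) (a : String),
    pvLoopA t a cs
      = a ++ PySem.Str.join "" ((cs.take (pvKNat t (pvCount a) cs)).map (fun c => "\n\n" ++ c)) := by
  induction cs with
  | nil => intro t a; simp [pvLoopA, pvKNat, pv_join_nil]
  | cons c cs ih =>
    intro t a
    simp only [pvLoopA, pvKNat]
    by_cases h : PySem.List.len (PySem.Str.split₀ a) < t
    · rw [if_pos h, if_neg (by simpa [pvCount] using not_le.mpr h)]
      rw [ih t (a ++ ("\n\n" ++ c)), pv_count_append]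
      simp only [List.take_succ_cons, List.map_cons, pv_join_cons]
      rw [String.append_assoc]
    · rw [if_neg h, if_pos (by simpa [pvCount] using not_lt.mp h)]
      simp [pv_join_nil]

theorem pv_foldl_scan (cs : List String) : ∀ (xs : List Int) (p : Int),
    cs.foldl (fun acc c => acc ++ [PySem.List.pyGetD acc (-1) 0 + PySem.List.len (PySem.Str.split₀ c)]) (xs ++ [p])
      = xs ++ pvScan p cs := by
  induction cs with
  | nil => intro xs p; simp [pvScan]
  | cons c cs ih =>
    intro xs p
    simp only [List.foldl_cons, pvScan]
    rw [PySem.List.pyGetD_neg_one_append_singleton]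
    have : (xs ++ [p]) ++ [p + PySem.List.len (PySem.Str.split₀ c)]
        = (xs ++ [p]) ++ [p + pvCount c] := rfl
    rw [this, ih (xs ++ [p]) (p + pvCount c)]
    simp

theorem pv_scan_ne_nil (p : Int) (cs : List String) : pvScan p cs ≠ [] := by
  cases cs <;> simp [pvScan]

theorem pv_dropLast_scan (cs : List String) : ∀ (p : Int), (pvScan p cs).dropLast = pvPfx p cs := by
  induction cs with
  | nil => intro p; simp [pvScan, pvPfx]
  | cons c cs ih =>
    intro p
    simp only [pvScan, pvPfx]
    rw [List.dropLast_cons_of_ne_nil (pv_scan_ne_nil _ _), ih]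

theorem pv_findK_eq (t : Int) (cs : List String) : ∀ (p : Int) (i : Int),
    pvFindK t (i + (cs.length : Int)) (pvPfx p cs) i = i + (pvKNat t p cs : Int) := by
  induction cs with
  | nil => intro p i; simp [pvFindK, pvPfx, pvKNat]
  | cons c cs ih =>
    intro p i
    simp only [pvPfx, pvFindK, pvKNat, List.length_cons]
    by_cases h : t ≤ p
    · rw [if_pos (by omega : p ≥ t), if_pos h]; simp
    · rw [if_neg (by omega : ¬ p ≥ t), if_neg h]
      simp only [Nat.cast_add, Nat.cast_one]
      rw [show i + ((cs.length : Int) + 1) = (i + 1) + (cs.length : Int) from by ring]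
      rw [ih (p + pvCount c) (i + 1)]
      ring

theorem pv_alt_eq (human_example doc_type : String) (t : Int) :
    generate_additional_clauses_py_alt human_example doc_type t
      = pvHeader ++ PySem.Str.join ""
          ((pvClauses.take (pvKNat t (pvCount pvHeader) pvClauses)).map (fun c => "\n\n" ++ c)) := by
  simp only [generate_additional_clauses_py_alt]
  rw [show [PySem.List.len (PySem.Str.split₀ pvHeader)] = ([] : List Int) ++ [pvCount pvHeader] from rfl]
  rw [pv_foldl_scan pvClauses [] (pvCount pvHeader), List.nil_append]
  rw [PySem.List.slice_to_neg_one, pv_dropLast_scan]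
  rw [show PySem.List.len pvClauses = 0 + (pvClauses.length : Int) from by simp [PySem.List.len_eq]]
  rw [pv_findK_eq t pvClauses (pvCount pvHeader) 0, zero_add]
  rw [PySem.List.slice_to_natCast]

theorem generate_additional_clauses_py_spec : Claim_equal_generate_additional_clauses_py := by
  intro human_example doc_type t _
  unfold Spec_generate_additional_clauses_py
  rw [pv_alt_eq]
  show pvLoopA t pvHeader pvClauses = _
  exact pv_loopA_eq pvClauses t pvHeader
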